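-- pv_equiv track=rewrite | github.com/benpclarke/bpc-tools-school-apps | control/scripts_app.py | build_abcd_menu
-- ===== SOURCE A (Python) =====
-- def build_abcd_menu(list_options):
--     menu_options = {}
--     alpha = 'a'
--     for idx in range(len(list_options)):
--         menu_options.update({alpha: list_options[idx]})
--         if alpha == 'a': alpha = 'b'
--         elif alpha == 'b': alpha = 'c'
--         elif alpha == 'c': alpha = 'd'
--         elif alpha == 'd': alpha = 'y'
--     return menu_options
-- ===== SOURCE B (Python) =====
-- def build_abcd_menu(list_options):
--     menu_options = dict(zip("abcd", list_options))
--     if len(list_options) > 4: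
--         menu_options["y"] = list_options[-1]
--     return menu_options
-- ===== Notes on version B (the rewrite author's own statement) =====
-- stated objective: faster
-- what changed: Replaced the full-list loop with an incrementally advanced letter state by a truncating zip of 'abcd' with the list plus one final 'y' assignment of the last element (overwrites at 'y' collapse to the last value), so B never iterates past the first four elements.
import Mathlib
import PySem

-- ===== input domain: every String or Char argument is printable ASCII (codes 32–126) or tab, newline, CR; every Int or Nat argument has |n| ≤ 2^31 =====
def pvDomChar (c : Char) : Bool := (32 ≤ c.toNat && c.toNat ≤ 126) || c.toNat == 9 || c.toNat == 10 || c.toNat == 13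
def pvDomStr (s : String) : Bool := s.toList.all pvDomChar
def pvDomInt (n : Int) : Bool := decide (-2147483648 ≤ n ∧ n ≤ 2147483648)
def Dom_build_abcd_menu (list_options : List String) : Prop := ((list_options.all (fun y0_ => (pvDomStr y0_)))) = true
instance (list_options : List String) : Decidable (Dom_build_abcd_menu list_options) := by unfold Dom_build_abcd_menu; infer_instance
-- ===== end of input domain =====

-- B replaces A's full-list loop with an advancing letter state by zip("abcd", list) plus one final "y" assignment of the last element (objective: faster — B never walks past the first four elements).

-- ===== PORT A =====
-- the if/elif chain advancing the letter, exactly as in A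
def stepAlpha (alpha : String) : String :=
  if alpha = "a" then "b"
  else if alpha = "b" then "c"
  else if alpha = "c" then "d"
  else if alpha = "d" then "y"
  else alpha

def build_abcd_menu (list_options : List String) : List (String × String) :=
  (((List.range list_options.length).foldl
      (fun (st : PySem.Dict String String × String) (idx : Nat) =>
        (st.1.insert st.2 ((PySem.List.pyGet? list_options (idx : Int)).getD ""), stepAlpha st.2))
      (PySem.Dict.empty, "a"))).1.items

-- ===== PORT B =====
def build_abcd_menu_alt (list_options : List String) : List (String × String) :=
  -- dict(zip("abcd", list_options)): zip truncates to the shorter side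
  let d := (List.zip ["a", "b", "c", "d"] list_options).foldl
      (fun (d : PySem.Dict String String) (p : String × String) => d.insert p.1 p.2)
      PySem.Dict.empty
  let d := if list_options.length > 4
           then d.insert "y" ((PySem.List.pyGet? list_options (-1)).getD "")
           else d
  d.items

-- ===== PRECONDITION & SPEC =====
def Spec_build_abcd_menu (list_options : List String) (out : List (String × String)) : Prop := out = build_abcd_menu_alt list_options
instance (list_options : List String) (out : List (String × String)) : Decidable (Spec_build_abcd_menu list_options out) := by unfold Spec_build_abcd_menu; infer_instance

-- ===== CLAIM (what is proved, stated in full; the proofs are below) =====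
def Claim_equal_build_abcd_menu : Prop := ∀ (list_options : List String), Dom_build_abcd_menu list_options → Spec_build_abcd_menu list_options (build_abcd_menu list_options)

-- ===== LEMMAS AND PROOFS =====

-- once alpha is "y", every remaining iteration overwrites key "y"; the dict collapses to one insert of the last indexed value
theorem tail_loop (xs : List String) :
    ∀ (m k : Nat) (d : PySem.Dict String String),
    ((List.range' k (m + 1)).foldl
        (fun (st : PySem.Dict String String × String) (idx : Nat) =>
          (st.1.insert st.2 ((PySem.List.pyGet? xs (idx : Int)).getD ""), stepAlpha st.2))
        (d, "y")).1
      = d.insert "y" ((PySem.List.pyGet? xs ((k + m : Nat) : Int)).getD "") := by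
  intro m
  induction m with
  | zero => intro k d; simp [List.range', stepAlpha]
  | succ m ih =>
    intro k d
    rw [List.range'_succ, List.foldl_cons]
    show ((List.range' (k+1) (m+1)).foldl _
        (d.insert "y" ((PySem.List.pyGet? xs (k : Int)).getD ""), stepAlpha "y")).1 = _
    have hs : stepAlpha "y" = "y" := by decide
    rw [hs, ih (k + 1)]
    rw [PySem.Dict.insert_insert_self,
        show (k + 1) + m = k + (m + 1) from by omega]

-- ===== VERDICT (by name: the statement is the Claim_ definition above) =====
theorem build_abcd_menu_spec : Claim_equal_build_abcd_menu := by
  intro xs _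
  unfold Spec_build_abcd_menu build_abcd_menu build_abcd_menu_alt
  match xs with
  | [] => rfl
  | [x0] => rfl
  | [x0, x1] => rfl
  | [x0, x1, x2] => rfl
  | [x0, x1, x2, x3] => rfl
  | x0 :: x1 :: x2 :: x3 :: x4 :: rest =>
    cases rest with
    | nil => rfl
    | cons r rs =>
      have hlen : (x0 :: x1 :: x2 :: x3 :: x4 :: r :: rs).length = 5 + (rs.length + 1) := by
        simp; omega
      rw [hlen, List.range_eq_range']
      have hsplit : List.range' 0 (5 + (rs.length + 1)) = [0, 1, 2, 3, 4] ++ List.range' 5 (rs.length + 1) := by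
        rw [← List.range'_append]; norm_num [List.range']
      rw [hsplit, List.foldl_append]
      have h5 : (([0, 1, 2, 3, 4] : List Nat).foldl
          (fun (st : PySem.Dict String String × String) (idx : Nat) =>
            (st.1.insert st.2 ((PySem.List.pyGet? (x0 :: x1 :: x2 :: x3 :: x4 :: r :: rs) (idx : Int)).getD ""), stepAlpha st.2))
          (PySem.Dict.empty, "a"))
        = (((((PySem.Dict.empty.insert "a" x0).insert "b" x1).insert "c" x2).insert "d" x3).insert "y" x4, "y") := by
        simp [stepAlpha]
      rw [h5, tail_loop, PySem.Dict.insert_insert_self]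
      have hv : PySem.List.pyGet? (x0 :: x1 :: x2 :: x3 :: x4 :: r :: rs) ((5 + rs.length : Nat) : Int)
          = PySem.List.pyGet? (x0 :: x1 :: x2 :: x3 :: x4 :: r :: rs) (-1) := by
        rw [PySem.List.pyGet?_neg_one, PySem.List.pyGet?_natCast, List.getLast?_eq_getElem?]
        congr 1
        simp; omega
      rw [hv]
      simp only [if_pos (show 5 + (rs.length + 1) > 4 by omega)]
      rfl
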